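-- pv_equiv track=rewrite | github.com/apundhir/license-compliance-checker | src/lcc/detection/rust.py | _compute_cargo_dependency_depths
-- ===== SOURCE A (Python) =====
-- def _compute_cargo_dependency_depths(
--
--     direct_names: set[str],
--     dep_graph: dict[str, list[str]],
-- ) -> tuple[dict[str, int], dict[str, list[str]]]:
--     """BFS from direct dependencies to compute depth and parent_packages."""
--     from collections import deque
--
--     depth_map: dict[str, int] = {}
--     parent_map: dict[str, list[str]] = {}
--
--     queue: deque[str] = deque()
--     for name in direct_names:
--         depth_map[name] = 0
--         parent_map[name] = []
--         queue.append(name)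
--
--     while queue:
--         current = queue.popleft()
--         current_depth = depth_map[current]
--         for child in dep_graph.get(current, []):
--             if child not in depth_map:
--                 depth_map[child] = current_depth + 1
--                 parent_map[child] = [current]
--                 queue.append(child)
--             else:
--                 if current not in parent_map.get(child, []):
--                     parent_map.setdefault(child, []).append(current)
--
--     return depth_map, parent_map
-- ===== SOURCE B (Python) =====
-- def _compute_cargo_dependency_depths(direct_names, dep_graph):
--     """Two-phase rewrite: a plain BFS fills depth_map and records the pop order;
--     a second pass over that order rebuilds parent_map without any bookkeeping
--     inside the BFS loop."""
--     from collections import deque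
--
--     depth_map = {}
--     queue = deque()
--     for name in direct_names:
--         depth_map[name] = 0
--         queue.append(name)
--
--     order = []
--     while queue:
--         current = queue.popleft()
--         order.append(current)
--         d = depth_map[current]
--         for child in dep_graph.get(current, []):
--             if child not in depth_map:
--                 depth_map[child] = d + 1
--                 queue.append(child)
--
--     parent_map = {name: [] for name in direct_names}
--     for current in order:
--         for child in dep_graph.get(current, []):
--             lst = parent_map.setdefault(child, [])
--             if current not in lst:
--                 lst.append(current)
--
--     return depth_map, parent_map
-- ===== Notes on version B (the rewrite author's own statement) =====
-- stated objective: alternative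
-- what changed: B splits A's single BFS into two phases: a plain BFS that only computes depths and records the pop order, then a separate pass over that recorded order that rebuilds the parent lists, instead of interleaving parent bookkeeping inside the BFS loop.
import Mathlib
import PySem

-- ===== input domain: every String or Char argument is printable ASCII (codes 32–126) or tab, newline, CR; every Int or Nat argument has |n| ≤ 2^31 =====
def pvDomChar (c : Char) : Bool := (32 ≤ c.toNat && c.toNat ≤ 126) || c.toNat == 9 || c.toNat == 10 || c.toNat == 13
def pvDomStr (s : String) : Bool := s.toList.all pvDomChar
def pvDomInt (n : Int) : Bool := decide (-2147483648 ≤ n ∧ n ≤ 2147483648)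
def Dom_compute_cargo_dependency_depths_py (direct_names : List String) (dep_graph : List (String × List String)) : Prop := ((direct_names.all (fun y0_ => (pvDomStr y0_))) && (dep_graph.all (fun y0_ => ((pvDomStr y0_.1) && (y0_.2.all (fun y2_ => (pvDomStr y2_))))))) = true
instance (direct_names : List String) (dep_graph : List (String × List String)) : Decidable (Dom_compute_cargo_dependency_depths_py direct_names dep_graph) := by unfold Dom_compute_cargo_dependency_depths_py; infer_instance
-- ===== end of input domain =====

-- B splits A's single BFS (depths + parent lists maintained together) into a plain
-- depth-only BFS recording the pop order, plus a separate second pass over that order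
-- rebuilding the parent lists; different decomposition, same return value.

-- dep_graph.get(current, []) — first-match association-list lookup
def pvGraphGet (g : List (String × List String)) (k : String) : List String :=
  (PySem.Dict.mk g).getD k []

-- ===== PORT A =====
-- one iteration of A's inner 'for child in dep_graph.get(current, [])' body
def pvAChild (current : String) (d : Int)
    (st : PySem.Dict String Int × PySem.Dict String (List String) × List String)
    (child : String) :
    PySem.Dict String Int × PySem.Dict String (List String) × List String :=
  let (dm, pm, q) := st
  if dm.contains child = false then
    (dm.insert child (d + 1), pm.insert child [current], q ++ [child])
  else
    if current ∈ pm.getD child [] then (dm, pm, q)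
    else (dm, (pm.setdefault child []).modify child [] (· ++ [current]), q)

-- A's 'while queue' loop; fuel bounds the number of pops (a safe upper bound is
-- supplied by the caller, so the 0-fuel branch is never the exit with a non-empty queue)
def pvALoop (g : List (String × List String)) :
    Nat → PySem.Dict String Int → PySem.Dict String (List String) → List String →
    PySem.Dict String Int × PySem.Dict String (List String)
  | 0, dm, pm, _ => (dm, pm)
  | n + 1, dm, pm, q =>
    match q with
    | [] => (dm, pm)
    | current :: rest =>
      let d := dm.getD current 0     -- depth_map[current]; every queued name is a key
      let s := (pvGraphGet g current).foldl (pvAChild current d) (dm, pm, rest)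
      pvALoop g n s.1 s.2.1 s.2.2

def compute_cargo_dependency_depths_py (direct_names : List String) (dep_graph : List (String × List String)) : (List (String × Int)) × (List (String × List String)) :=
  let init := direct_names.foldl
    (fun (st : PySem.Dict String Int × PySem.Dict String (List String) × List String) name =>
      (st.1.insert name 0, st.2.1.insert name [], st.2.2 ++ [name]))
    (PySem.Dict.empty, PySem.Dict.empty, [])
  let fuel := direct_names.length + (dep_graph.map (fun p => p.2.length)).sum
  let r := pvALoop dep_graph fuel init.1 init.2.1 init.2.2
  (r.1.items, r.2.items)

-- ===== PORT B =====
-- one iteration of the depth-only BFS inner loop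
def pvBChild (d : Int)
    (st : PySem.Dict String Int × List String) (child : String) :
    PySem.Dict String Int × List String :=
  let (dm, q) := st
  if dm.contains child = false then (dm.insert child (d + 1), q ++ [child])
  else (dm, q)

-- B's 'while queue' loop: depths only, plus the recorded pop order
def pvBLoop (g : List (String × List String)) :
    Nat → PySem.Dict String Int → List String → List String →
    PySem.Dict String Int × List String
  | 0, dm, _, order => (dm, order)
  | n + 1, dm, q, order =>
    match q with
    | [] => (dm, order)
    | current :: rest =>
      let d := dm.getD current 0
      let s := (pvGraphGet g current).foldl (pvBChild d) (dm, rest)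
      pvBLoop g n s.1 s.2 (order ++ [current])

-- second pass: 'lst = parent_map.setdefault(child, []); if current not in lst: lst.append(current)'
def pvPStep (current : String) (pm : PySem.Dict String (List String)) (child : String) :
    PySem.Dict String (List String) :=
  let pm1 := pm.setdefault child []
  if current ∈ pm1.getD child [] then pm1
  else pm1.modify child [] (· ++ [current])

def compute_cargo_dependency_depths_py_alt (direct_names : List String) (dep_graph : List (String × List String)) : (List (String × Int)) × (List (String × List String)) :=
  let init := direct_names.foldl
    (fun (p : PySem.Dict String Int × List String) name => (p.1.insert name 0, p.2 ++ [name]))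
    (PySem.Dict.empty, [])
  let fuel := direct_names.length + (dep_graph.map (fun p => p.2.length)).sum
  let r := pvBLoop dep_graph fuel init.1 init.2 []
  let pm0 := direct_names.foldl
    (fun (pm : PySem.Dict String (List String)) name => pm.insert name []) PySem.Dict.empty
  let pmF := r.2.foldl (fun pm current => (pvGraphGet dep_graph current).foldl (pvPStep current) pm) pm0
  (r.1.items, pmF.items)

-- ===== PRECONDITION & SPEC =====
def Spec_compute_cargo_dependency_depths_py (direct_names : List String) (dep_graph : List (String × List String)) (out : (List (String × Int)) × (List (String × List String))) : Prop := out = compute_cargo_dependency_depths_py_alt direct_names dep_graph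
instance (direct_names : List String) (dep_graph : List (String × List String)) (out : (List (String × Int)) × (List (String × List String))) : Decidable (Spec_compute_cargo_dependency_depths_py direct_names dep_graph out) := by unfold Spec_compute_cargo_dependency_depths_py; infer_instance

-- ===== CLAIM (what is proved, stated in full; the proofs are below) =====
def Claim_equal_compute_cargo_dependency_depths_py : Prop := ∀ (direct_names : List String) (dep_graph : List (String × List String)), Dom_compute_cargo_dependency_depths_py direct_names dep_graph → Spec_compute_cargo_dependency_depths_py direct_names dep_graph (compute_cargo_dependency_depths_py direct_names dep_graph)

-- ===== LEMMAS AND PROOFS =====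

-- inserting (any values) under the same key preserves equality of key lists
theorem pv_keys_insert_congr {ν₁ ν₂ : Type} (dm : PySem.Dict String ν₁)
    (pm : PySem.Dict String ν₂) (k : String) (v : ν₁) (w : ν₂)
    (h : pm.keys = dm.keys) : (pm.insert k w).keys = (dm.insert k v).keys := by
  by_cases hc : dm.contains k = true
  · have hp : pm.contains k = true := by
      rw [PySem.Dict.contains_eq_decide_mem_keys, h, ← PySem.Dict.contains_eq_decide_mem_keys]
      exact hc
    rw [PySem.Dict.keys_insert_of_contains pm w hp,
        PySem.Dict.keys_insert_of_contains dm v hc, h]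
  · have hc' : dm.contains k = false := by revert hc; cases dm.contains k <;> simp
    have hp : pm.contains k = false := by
      rw [PySem.Dict.contains_eq_decide_mem_keys, h, ← PySem.Dict.contains_eq_decide_mem_keys]
      exact hc'
    rw [PySem.Dict.keys_insert_of_not_contains pm w hp,
        PySem.Dict.keys_insert_of_not_contains dm v hc', h]

-- the initialisation loops: A's triple fold = B's pair fold + pm fold + queue
theorem pv_init_eq : ∀ (l : List String)
    (dm : PySem.Dict String Int) (pm : PySem.Dict String (List String)) (q : List String),
    l.foldl (fun st name => (st.1.insert name 0, st.2.1.insert name [], st.2.2 ++ [name])) (dm, pm, q)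
      = ((l.foldl (fun p name => (p.1.insert name 0, p.2 ++ [name])) (dm, q)).1,
         l.foldl (fun pm name => pm.insert name []) pm,
         (l.foldl (fun p name => (p.1.insert name 0, p.2 ++ [name])) (dm, q)).2)
  | [], _, _, _ => rfl
  | n :: l, dm, pm, q => pv_init_eq l (dm.insert n 0) (pm.insert n []) (q ++ [n])

theorem pv_init_keys : ∀ (l : List String)
    (dm : PySem.Dict String Int) (pm : PySem.Dict String (List String)) (q : List String),
    pm.keys = dm.keys →
    (l.foldl (fun pm name => pm.insert name []) pm).keys
      = (l.foldl (fun p name => (p.1.insert name 0, p.2 ++ [name])) (dm, q)).1.keys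
  | [], _, _, _, h => h
  | n :: l, dm, pm, q, h =>
    pv_init_keys l (dm.insert n 0) (pm.insert n []) (q ++ [n])
      (pv_keys_insert_congr dm pm n 0 [] h)

-- one inner-loop fold: A's (depth, parent, queue) fold splits into B's depth/queue fold
-- and the parent-pass fold, and key lists stay equal
theorem pv_inner_eq (current : String) (d : Int) : ∀ (cs : List String)
    (dm : PySem.Dict String Int) (pm : PySem.Dict String (List String)) (q : List String),
    pm.keys = dm.keys →
    cs.foldl (pvAChild current d) (dm, pm, q)
      = ((cs.foldl (pvBChild d) (dm, q)).1,
         cs.foldl (pvPStep current) pm,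
         (cs.foldl (pvBChild d) (dm, q)).2)
    ∧ (cs.foldl (pvPStep current) pm).keys = (cs.foldl (pvBChild d) (dm, q)).1.keys
  | [], _, _, _, h => ⟨rfl, h⟩
  | c :: cs, dm, pm, q, h => by
    have hck : pm.contains c = dm.contains c := by
      rw [PySem.Dict.contains_eq_decide_mem_keys, PySem.Dict.contains_eq_decide_mem_keys, h]
    by_cases hcb : dm.contains c = true
    · -- c already known: depth/queue untouched, parent update identical on both sides
      have hpc : pm.contains c = true := by rw [hck]; exact hcb
      have hsd : pm.setdefault c [] = pm := PySem.Dict.setdefault_of_contains pm [] hpc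
      have hB : pvBChild d (dm, q) c = (dm, q) := by simp [pvBChild, hcb]
      by_cases hmem : current ∈ pm.getD c []
      · have hA : pvAChild current d (dm, pm, q) c = (dm, pm, q) := by
          simp [pvAChild, hcb, hmem]
        have hstep : pvPStep current pm c = pm := by simp [pvPStep, hsd, hmem]
        have := pv_inner_eq current d cs dm pm q h
        simpa [List.foldl_cons, hA, hB, hstep] using this
      · have hA : pvAChild current d (dm, pm, q) c
            = (dm, pm.modify c [] (· ++ [current]), q) := by
          simp [pvAChild, hcb, hmem, hsd]
        have hstep : pvPStep current pm c = pm.modify c [] (· ++ [current]) := by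
          simp [pvPStep, hsd, hmem]
        have hkeys : (pm.modify c [] (· ++ [current])).keys = dm.keys := by
          rw [PySem.Dict.keys_modify, PySem.Dict.keys_insert_of_contains _ _ hpc, h]
        have := pv_inner_eq current d cs dm (pm.modify c [] (· ++ [current])) q hkeys
        simpa [List.foldl_cons, hA, hB, hstep] using this
    · -- discovery: c is a new key everywhere
      have hc : dm.contains c = false := by revert hcb; cases dm.contains c <;> simp
      have hpc : pm.contains c = false := by rw [hck]; exact hc
      have hstep : pvPStep current pm c = pm.insert c [current] := by
        simp only [pvPStep, PySem.Dict.setdefault_of_not_contains pm [] hpc]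
        rw [if_neg (by rw [PySem.Dict.getD_insert_self]; exact List.not_mem_nil)]
        unfold PySem.Dict.modify
        rw [PySem.Dict.getD_insert_self, PySem.Dict.insert_insert_self]
        simp
      have hA : pvAChild current d (dm, pm, q) c
          = (dm.insert c (d + 1), pm.insert c [current], q ++ [c]) := by
        simp [pvAChild, hc]
      have hB : pvBChild d (dm, q) c = (dm.insert c (d + 1), q ++ [c]) := by
        simp [pvBChild, hc]
      have := pv_inner_eq current d cs (dm.insert c (d + 1)) (pm.insert c [current]) (q ++ [c])
        (pv_keys_insert_congr dm pm c (d + 1) [current] h)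
      simpa [List.foldl_cons, hA, hB, hstep] using this

-- the recorded-order accumulator of B's BFS is a plain prefix
theorem pv_bloop_acc (g : List (String × List String)) : ∀ (n : Nat)
    (dm : PySem.Dict String Int) (q o : List String),
    pvBLoop g n dm q o = ((pvBLoop g n dm q []).1, o ++ (pvBLoop g n dm q []).2)
  | 0, dm, q, o => by simp [pvBLoop]
  | n + 1, dm, q, o => by
    match q with
    | [] => simp [pvBLoop]
    | current :: rest =>
      simp only [pvBLoop]
      rw [pv_bloop_acc g n _ _ (o ++ [current]), pv_bloop_acc g n _ _ ([] ++ [current])]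
      simp

-- main loop correspondence: A's loop = B's loop + the second (parent) pass over the pop order
theorem pv_loop_eq (g : List (String × List String)) : ∀ (n : Nat)
    (dm : PySem.Dict String Int) (pm : PySem.Dict String (List String)) (q : List String),
    pm.keys = dm.keys →
    pvALoop g n dm pm q
      = ((pvBLoop g n dm q []).1,
         (pvBLoop g n dm q []).2.foldl
           (fun pm cur => (pvGraphGet g cur).foldl (pvPStep cur) pm) pm)
  | 0, dm, pm, q, _ => rfl
  | n + 1, dm, pm, q, h => by
    match q with
    | [] => simp [pvALoop, pvBLoop]
    | current :: rest =>
      have hinner := pv_inner_eq current (dm.getD current 0) (pvGraphGet g current) dm pm rest h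
      simp only [pvALoop, pvBLoop]
      rw [hinner.1]
      rw [pv_loop_eq g n _ _ _ hinner.2]
      rw [pv_bloop_acc g n _ _ ([] ++ [current])]
      simp

-- ===== VERDICT (by name: the statement is the Claim_ definition above) =====
theorem compute_cargo_dependency_depths_py_spec : Claim_equal_compute_cargo_dependency_depths_py := by
  intro direct_names dep_graph _
  unfold Spec_compute_cargo_dependency_depths_py
  unfold compute_cargo_dependency_depths_py compute_cargo_dependency_depths_py_alt
  simp only
  rw [pv_init_eq direct_names PySem.Dict.empty PySem.Dict.empty []]
  rw [pv_loop_eq dep_graph _ _ _ _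
    (pv_init_keys direct_names PySem.Dict.empty PySem.Dict.empty [] rfl)]
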